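-- pv_equiv track=rewrite | github.com/jmetzz/algorithms-challenges-lab-python | src/challenges/problems/leetcode/15_three_sum.py | split_nums
-- ===== SOURCE A (Python) =====
-- def split_nums(elements):
--     zeros = 0
--     negatives = dict()
--     positives = dict()
--
--     for e in elements:
--         if e == 0:
--             zeros += 1
--         elif e < 0:
--             if e not in negatives:
--                 negatives[e] = 0
--             negatives[e] += 1
--         else:
--             if e not in positives:
--                 positives[e] = 0
--             positives[e] += 1
--     return zeros, negatives, positives
-- ===== SOURCE B (Python) =====
-- def split_nums(elements):
--     seq = list(elements)
--     neg_keys = dict.fromkeys(e for e in seq if e < 0)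
--     pos_keys = dict.fromkeys(e for e in seq if e > 0)
--     return (seq.count(0),
--             {k: seq.count(k) for k in neg_keys},
--             {k: seq.count(k) for k in pos_keys})
-- ===== Notes on version B (the rewrite author's own statement) =====
-- stated objective: alternative
-- what changed: A's single incremental-counter loop is replaced by a dedup-then-count scheme: collect the distinct negative/positive keys in first-occurrence order with dict.fromkeys over filtered passes, then build each dict by counting every key's total occurrences with list.count (no running counts are maintained).
import Mathlib
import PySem

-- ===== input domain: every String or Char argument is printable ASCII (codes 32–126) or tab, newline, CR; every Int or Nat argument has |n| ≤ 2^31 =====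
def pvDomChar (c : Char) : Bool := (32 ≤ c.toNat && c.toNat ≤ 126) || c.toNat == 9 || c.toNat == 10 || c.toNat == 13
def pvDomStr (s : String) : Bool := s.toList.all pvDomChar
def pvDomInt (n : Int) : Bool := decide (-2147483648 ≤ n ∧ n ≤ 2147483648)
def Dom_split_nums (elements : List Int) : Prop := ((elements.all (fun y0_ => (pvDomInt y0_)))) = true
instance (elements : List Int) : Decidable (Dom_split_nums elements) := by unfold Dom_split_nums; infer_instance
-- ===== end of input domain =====

-- B collects the distinct negative/positive keys first, then counts each key with list.count, instead of A's single incremental-counter loop; objective: alternative decomposition.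


-- ===== PORT A =====
-- one loop over elements carrying (zeros, negatives, positives); the `if e not in d: d[e] = 0; d[e] += 1`
-- idiom is ported literally as a conditional insert of 0 followed by `insert e (getD e 0 + 1)`
def split_nums (elements : List Int) : Int × (List (Int × Int)) × (List (Int × Int)) :=
  let st := elements.foldl
    (fun (st : Int × PySem.Dict Int Int × PySem.Dict Int Int) e =>
      let zeros := st.1
      let negatives := st.2.1
      let positives := st.2.2
      if e == 0 then
        (zeros + 1, negatives, positives)
      else if e < 0 then
        let negatives := if negatives.contains e then negatives else negatives.insert e 0
        (zeros, negatives.insert e (negatives.getD e 0 + 1), positives)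
      else
        let positives := if positives.contains e then positives else positives.insert e 0
        (zeros, negatives, positives.insert e (positives.getD e 0 + 1)))
    (0, PySem.Dict.empty, PySem.Dict.empty)
  (st.1, st.2.1.items, st.2.2.items)

-- ===== PORT B =====
-- dict.fromkeys over a filtered pass = PySem.List.dedup of the filtered list (distinct keys,
-- first-occurrence order); then the dict comprehensions {k: seq.count(k) for k in keys} and seq.count(0)
def split_nums_alt (elements : List Int) : Int × (List (Int × Int)) × (List (Int × Int)) :=
  let seq := elements
  let neg_keys := PySem.List.dedup (seq.filter (fun e => decide (e < 0)))
  let pos_keys := PySem.List.dedup (seq.filter (fun e => decide (0 < e)))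
  let negatives := neg_keys.foldl (fun (d : PySem.Dict Int Int) k => d.insert k (PySem.List.count seq k : Int)) PySem.Dict.empty
  let positives := pos_keys.foldl (fun (d : PySem.Dict Int Int) k => d.insert k (PySem.List.count seq k : Int)) PySem.Dict.empty
  ((PySem.List.count seq 0 : Int), negatives.items, positives.items)

-- ===== PRECONDITION & SPEC =====
def Spec_split_nums (elements : List Int) (out : Int × (List (Int × Int)) × (List (Int × Int))) : Prop := out = split_nums_alt elements
instance (elements : List Int) (out : Int × (List (Int × Int)) × (List (Int × Int))) : Decidable (Spec_split_nums elements out) := by unfold Spec_split_nums; infer_instance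

-- ===== CLAIM =====
def Claim_equal_split_nums : Prop := ∀ (elements : List Int), Dom_split_nums elements → Spec_split_nums elements (split_nums elements)

-- ===== LEMMAS AND PROOFS =====

-- A's conditional-insert-then-increment step is exactly `insert e (getD e 0 + 1)`
theorem astep_eq (d : PySem.Dict Int Int) (e : Int) :
    (if d.contains e then d else d.insert e 0).insert e
      ((if d.contains e then d else d.insert e 0).getD e 0 + 1)
    = d.insert e (d.getD e 0 + 1) := by
  by_cases h : d.contains e = true
  · simp [h]
  · simp only [Bool.not_eq_true] at h
    simp [h, PySem.Dict.getD_insert_self, PySem.Dict.insert_insert_self,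
      PySem.Dict.getD_of_not_contains d 0 h]

-- A's loop splits into a zero count and two counter folds over the filtered lists
theorem loop_inv (l : List Int) (z : Int) (dn dp : PySem.Dict Int Int) :
    l.foldl
      (fun (st : Int × PySem.Dict Int Int × PySem.Dict Int Int) e =>
        let zeros := st.1
        let negatives := st.2.1
        let positives := st.2.2
        if e == 0 then
          (zeros + 1, negatives, positives)
        else if e < 0 then
          let negatives := if negatives.contains e then negatives else negatives.insert e 0
          (zeros, negatives.insert e (negatives.getD e 0 + 1), positives)
        else
          let positives := if positives.contains e then positives else positives.insert e 0
          (zeros, negatives, positives.insert e (positives.getD e 0 + 1)))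
      (z, dn, dp)
    = (z + (l.count 0 : Int),
       (l.filter (fun e => decide (e < 0))).foldl (fun d x => d.insert x (d.getD x 0 + 1)) dn,
       (l.filter (fun e => decide (0 < e))).foldl (fun d x => d.insert x (d.getD x 0 + 1)) dp) := by
  induction l generalizing z dn dp with
  | nil => simp
  | cons e l ih =>
    simp only [List.foldl_cons, List.filter_cons, List.count_cons]
    by_cases h0 : e = 0
    · subst h0
      exact (ih (z + 1) dn dp).trans (by simp; ring_nf)
    · have h0' : (e == 0) = false := by simp [h0]
      by_cases hn : e < 0
      · have hp : ¬ (0 < e) := by omega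
        simp only [h0', Bool.false_eq_true, if_false, decide_eq_true_eq, hn, if_true, hp]
        rw [astep_eq dn e]
        refine (ih z _ dp).trans ?_
        simp
      · have hp : 0 < e := by omega
        simp only [h0', Bool.false_eq_true, if_false, decide_eq_true_eq, hn, hp, if_true]
        rw [astep_eq dp e]
        refine (ih z dn _).trans ?_
        simp

-- {k: seq.count(k) for k in Set.ofList xs} has items  (Set.ofList xs).map (k, seq.count k)
theorem comp_items (xs seq : List Int) :
    ((PySem.Set.ofList xs).foldl (fun (d : PySem.Dict Int Int) k => d.insert k ((List.count k seq : Nat) : Int)) PySem.Dict.empty).items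
    = (PySem.Set.ofList xs).map (fun k => (k, ((List.count k seq : Nat) : Int))) := by
  have h := PySem.Dict.items_foldl_insert_fresh (l := PySem.Set.ofList xs) (k := fun x => x)
    (v := fun k => ((List.count k seq : Nat) : Int)) (d := PySem.Dict.empty)
    (by intro a _; simp [PySem.Dict.contains_empty])
    (by simp [PySem.Set.nodup_ofList xs])
  simpa using h

-- counting a key that satisfies the filter predicate in the filtered list = counting it in seq
theorem count_filter_eq (seq : List Int) (p : Int → Bool) (k : Int) (hk : p k = true) :
    (seq.filter p).count k = seq.count k := by
  induction seq with
  | nil => rfl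
  | cons e l ih =>
    by_cases he : e = k
    · subst he; simp [hk, ih]
    · by_cases hp : p e = true
      · simp [hp, he, ih]
      · simp [hp, he, ih]

-- ===== VERDICT =====
theorem split_nums_spec : Claim_equal_split_nums := by
  intro seq _
  unfold Spec_split_nums split_nums split_nums_alt
  simp only [loop_inv, PySem.List.dedup_eq_ofList, PySem.Dict.foldl_insert_getD_add_one_eq_counter,
    PySem.Dict.items_counter, zero_add, PySem.List.count_eq, comp_items]
  refine Prod.ext rfl (Prod.ext ?_ ?_) <;>
  · refine List.map_congr_left ?_
    intro k hk
    rw [PySem.Set.mem_ofList] at hk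
    have := List.of_mem_filter hk
    rw [count_filter_eq seq _ k (by simpa using this)]
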